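-- pv_equiv track=rewrite | github.com/codezapper/chip8 | display.py | get_lines_representation
-- ===== SOURCE A (Python) =====
-- def get_lines_representation(hex_list):
--     lines = []
--     for n in hex_list:
--         s = ''
--         bit = 0x80
--         while bit > 0:
--             if n & bit:
--                 s += '#'
--             else:
--                 s += ' '
--             bit >>= 1
--         lines.append(s)
--
--     return lines
-- ===== SOURCE B (Python) =====
-- def get_lines_representation(hex_list):
--     table = str.maketrans('10', '# ')
--     return [format(n & 0xFF, '08b').translate(table) for n in hex_list]
-- ===== Notes on version B (the rewrite author's own statement) =====
-- stated objective: idiomatic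
-- what changed: The inner 8-iteration bit-masking while-loop is replaced by a closed-form conversion: format(n & 0xFF, '08b') followed by a str.translate mapping '1'->'#' and '0'->' ', inside a list comprehension.
import Mathlib
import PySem

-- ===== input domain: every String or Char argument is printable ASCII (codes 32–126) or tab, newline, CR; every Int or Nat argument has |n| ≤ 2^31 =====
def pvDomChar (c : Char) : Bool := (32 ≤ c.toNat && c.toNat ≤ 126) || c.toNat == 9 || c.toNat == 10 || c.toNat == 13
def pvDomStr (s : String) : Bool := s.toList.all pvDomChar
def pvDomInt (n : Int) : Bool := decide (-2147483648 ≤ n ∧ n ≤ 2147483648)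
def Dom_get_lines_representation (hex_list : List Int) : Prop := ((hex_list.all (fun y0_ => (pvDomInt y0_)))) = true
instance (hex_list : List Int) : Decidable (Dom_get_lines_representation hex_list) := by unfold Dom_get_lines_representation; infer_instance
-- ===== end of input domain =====

-- B replaces A's hand-written 8-step bit-masking while-loop by a closed-form '08b' binary
-- formatting of n & 0xFF followed by the character translation '1'→'#', '0'→' ' (objective: idiomatic).

-- ===== PORT A =====
-- A's while-loop; bit is always a nonnegative small int (0x80, 0x40, …, 1, 0), carried as Nat.
-- The fuel argument only makes the recursion structural (the entry call passes fuel 9 > the 8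
-- iterations the loop performs); 'n & bit' is PySem.Int.band (Python-exact, also on negatives).
def pvGlyphLoop (n : Int) : Nat → Nat → List Char → List Char
  | 0, _, s => s
  | fuel + 1, bit, s =>
    if bit > 0 then
      pvGlyphLoop n fuel (bit >>> 1) (s ++ [if PySem.Int.band n (bit : Int) ≠ 0 then '#' else ' '])
    else s

def get_lines_representation (hex_list : List Int) : List String :=
  hex_list.foldl (fun lines n => lines ++ [String.mk (pvGlyphLoop n 9 0x80 [])]) []

-- ===== PORT B =====
-- format(m, '08b') for 0 ≤ m < 256: most-significant bit first
def pvBits8 (m : Nat) : List Char :=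
  (List.range 8).map (fun i => if m.testBit (7 - i) then '1' else '0')

-- str.maketrans('10', '# ') applied characterwise
def pvTranslate (c : Char) : Char := if c = '1' then '#' else if c = '0' then ' ' else c

def get_lines_representation_alt (hex_list : List Int) : List String :=
  hex_list.map (fun n => String.mk ((pvBits8 (PySem.Int.band n 255).toNat).map pvTranslate))

-- ===== PRECONDITION & SPEC =====
def Spec_get_lines_representation (hex_list : List Int) (out : List String) : Prop := out = get_lines_representation_alt hex_list
instance (hex_list : List Int) (out : List String) : Decidable (Spec_get_lines_representation hex_list out) := by unfold Spec_get_lines_representation; infer_instance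

-- ===== CLAIM (what is proved, stated in full; the proofs are below) =====
def Claim_equal_get_lines_representation : Prop := ∀ (hex_list : List Int), Dom_get_lines_representation hex_list → Spec_get_lines_representation hex_list (get_lines_representation hex_list)

-- ===== LEMMAS AND PROOFS =====

-- canonical representative of n modulo 256, keeping the sign shape
def pvRep (n : Int) : Int :=
  if 0 ≤ n then ((n.toNat % 256 : Nat) : Int) else Int.negSucc ((-n - 1).toNat % 256)

-- the glyph of one byte, as B computes it
def pvGlyphB (n : Int) : List Char := (pvBits8 (PySem.Int.band n 255).toNat).map pvTranslate

theorem pv_and_mod256 (b x : Nat) (hb : b < 256) : b &&& (x % 256) = b &&& x := by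
  apply Nat.eq_of_testBit_eq
  intro k
  rcases lt_or_ge k 8 with hk | hk
  · have h2 : (x % 256).testBit k = x.testBit k := by
      have h : x % 256 = x % 2 ^ 8 := by norm_num
      rw [h, Nat.testBit_mod_two_pow]
      simp [hk]
    simp [Nat.testBit_and, h2]
  · have h1 : b.testBit k = false := Nat.testBit_eq_false_of_lt (lt_of_lt_of_le hb (by
      calc (256:Nat) = 2^8 := by norm_num
      _ ≤ 2^k := Nat.pow_le_pow_right (by norm_num) hk))
    simp [Nat.testBit_and, h1]

theorem pv_band_negSucc (c b : Nat) :
    PySem.Int.band (Int.negSucc c) (b : Int) = ((b - (b &&& c) : Nat) : Int) := by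
  have h1 : ¬ (0 : Int) ≤ Int.negSucc c := by omega
  have h3 : (0 : Int) ≤ (b : Int) := by positivity
  have h4 : (-(Int.negSucc c) - 1).toNat = c := by simp [Int.negSucc_eq]
  simp only [PySem.Int.band, if_neg h1, if_pos h3, h4, Int.toNat_natCast]

theorem pv_rep_negSucc (c : Nat) : pvRep (Int.negSucc c) = Int.negSucc (c % 256) := by
  have h1 : ¬ (0 : Int) ≤ Int.negSucc c := by omega
  have h4 : (-(Int.negSucc c) - 1).toNat = c := by simp [Int.negSucc_eq]
  simp only [pvRep, if_neg h1, h4]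

theorem pv_band_rep (n : Int) (b : Nat) (hb : b < 256) :
    PySem.Int.band (pvRep n) (b : Int) = PySem.Int.band n (b : Int) := by
  rcases n with a | c
  · have h : (0:Int) ≤ Int.ofNat a := Int.natCast_nonneg a
    simp only [pvRep, if_pos h]
    show PySem.Int.band ((a % 256 : Nat) : Int) (b:Int) = PySem.Int.band ((a : Nat) : Int) (b:Int)
    simp only [PySem.Int.band_natCast]
    rw [Nat.and_comm, pv_and_mod256 b _ hb, Nat.and_comm]
  · rw [pv_rep_negSucc, pv_band_negSucc, pv_band_negSucc, pv_and_mod256 b _ hb]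

theorem pv_loop_rep (n : Int) : ∀ (fuel bit : Nat) (s : List Char), bit < 256 →
    pvGlyphLoop (pvRep n) fuel bit s = pvGlyphLoop n fuel bit s := by
  intro fuel
  induction fuel with
  | zero => intro bit s _; rfl
  | succ fuel ih =>
    intro bit s hbit
    simp only [pvGlyphLoop]
    by_cases h : bit > 0
    · rw [if_pos h, if_pos h, pv_band_rep n bit hbit,
        ih (bit >>> 1) _ (by simp only [Nat.shiftRight_eq_div_pow]; omega)]
    · rw [if_neg h, if_neg h]

theorem pv_glyphB_rep (n : Int) : pvGlyphB (pvRep n) = pvGlyphB n := by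
  unfold pvGlyphB
  rw [show ((255:Int) = ((255:Nat):Int)) from rfl, pv_band_rep n 255 (by norm_num)]

set_option maxRecDepth 40000 in
theorem pv_fin : ∀ r : Fin 256,
    pvGlyphLoop ((r.val : Nat) : Int) 9 128 [] = pvGlyphB ((r.val : Nat) : Int) ∧
    pvGlyphLoop (Int.negSucc r.val) 9 128 [] = pvGlyphB (Int.negSucc r.val) := by decide

theorem pv_glyph (n : Int) : pvGlyphLoop n 9 128 [] = pvGlyphB n := by
  rw [← pv_loop_rep n 9 128 [] (by norm_num), ← pv_glyphB_rep n]
  rcases n with a | c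
  · have h : (0:Int) ≤ Int.ofNat a := Int.natCast_nonneg a
    have hrep : pvRep (Int.ofNat a) = ((a % 256 : Nat) : Int) := by
      simp only [pvRep, if_pos h]; rfl
    rw [hrep]
    exact (pv_fin ⟨a % 256, Nat.mod_lt a (by norm_num)⟩).1
  · rw [pv_rep_negSucc]
    exact (pv_fin ⟨c % 256, Nat.mod_lt c (by norm_num)⟩).2

theorem pv_foldl (l : List Int) (acc : List String) :
    l.foldl (fun lines n => lines ++ [String.mk (pvGlyphLoop n 9 0x80 [])]) acc
      = acc ++ l.map (fun n => String.mk (pvGlyphB n)) := by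
  induction l generalizing acc with
  | nil => simp
  | cons x xs ih => rw [List.foldl_cons, ih, List.map_cons, pv_glyph]; simp

-- ===== VERDICT (by name: the statement is the Claim_ definition above) =====
theorem get_lines_representation_spec : Claim_equal_get_lines_representation := by
  intro hex_list _
  unfold Spec_get_lines_representation get_lines_representation get_lines_representation_alt
  simpa [pvGlyphB] using pv_foldl hex_list []
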